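-- pv_equiv track=rewrite | github.com/inae-kim-99/algorithm | programmers/programmers_43238.py | solution
-- ===== SOURCE A (Python) =====
-- def solution(n, times):
--     answer = 0
--
--     left, right = 0, n * max(times)
--     while left <= right:
--         people = 0
--         mid = (left + right) // 2
--
--         for time in times:
--             people += (mid // time)
--             if people > n:
--                 break
--
--         if people >= n:
--             answer = mid
--             right = mid - 1
--         else:
--             left = mid + 1
--
--     return answer
-- ===== SOURCE B (Python) =====
-- def solution(n, times):
--     # Two phases: (1) integer secant jumps grow a time T while keeping
--     # count(T) = sum(T//t) at most n-1 (T never needs to pass n*min(times));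
--     # (2) greedy event simulation: each booth's next completion starts just
--     # after T, and the remaining n - count(T) earliest completions are popped
--     # one by one; the last popped completion time is the answer.
--     if n <= 0:
--         return 0
--     m = len(times)
--     tmin = min(times)
--     T = 0
--     f = 0
--     while T <= n * tmin:
--         d = (n - 1 - m - f) * max(T, 1) // (f + m)
--         if d < 1:
--             break
--         T += d
--         f = sum(T // t for t in times)
--     nxt = [(T // t + 1) * t for t in times]
--     last = T
--     for _ in range(n - f):
--         i, best = 0, nxt[0]
--         for j, x in enumerate(nxt):
--             if x < best:
--                 i, best = j, x
--         last = best
--         nxt[i] = best + times[i]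
--     return last
-- ===== Notes on version B (the rewrite author's own statement) =====
-- stated objective: alternative
-- what changed: Replaces the left/right binary search on the answer by a different exact strategy: integer secant jumps grow a time T while keeping count(T) <= n-1 (no bisection, no retreat), then a greedy event simulation pops the remaining earliest booth completions one by one; the last popped completion time is the answer.
-- outside the precondition, e.g. on solution(3, [-2]): A returns 0, B returns -6; on solution(-2, [-3]): A returns 0, B returns 0; on solution(0, [0]): A raises ZeroDivisionError, B returns 0
import Mathlib
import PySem

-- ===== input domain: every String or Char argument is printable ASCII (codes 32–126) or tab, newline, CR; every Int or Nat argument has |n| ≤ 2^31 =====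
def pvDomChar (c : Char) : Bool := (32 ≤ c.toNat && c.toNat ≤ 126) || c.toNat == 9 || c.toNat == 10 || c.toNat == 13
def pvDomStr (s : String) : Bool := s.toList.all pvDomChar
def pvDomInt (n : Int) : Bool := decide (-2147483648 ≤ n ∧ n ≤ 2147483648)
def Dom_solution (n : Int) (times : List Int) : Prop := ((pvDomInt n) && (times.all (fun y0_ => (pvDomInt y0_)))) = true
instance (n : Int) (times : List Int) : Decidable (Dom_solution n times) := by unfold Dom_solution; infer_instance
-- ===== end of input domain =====

-- B replaces A's binary search on the answer by integer secant jumps that keep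
-- count(T) <= n-1, finished by a greedy event simulation popping the remaining
-- earliest completions; the last popped completion time is returned (objective: alternative).

-- ===== PORT A =====
-- inner 'for time in times: people += mid//time; if people > n: break' loop
def aCount (n mid : Int) : List Int → Int → Int
  | [], people => people
  | t :: rest, people =>
    let p := people + PySem.Int.floordiv mid t
    if p > n then p else aCount n mid rest p

-- termination measures for the while-loop (named, to keep the proof terms out of the definition)
theorem aLoop_dec1 (left right : Int) (h : left ≤ right) :
    (PySem.Int.floordiv (left + right) 2 - 1 + 1 - left).toNat < (right + 1 - left).toNat := by
  have := PySem.Int.floordiv_two_mid_bounds h; omega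

theorem aLoop_dec2 (left right : Int) (h : left ≤ right) :
    (right + 1 - (PySem.Int.floordiv (left + right) 2 + 1)).toNat < (right + 1 - left).toNat := by
  have := PySem.Int.floordiv_two_mid_bounds h; omega

-- outer 'while left <= right' loop
def aLoop (n : Int) (times : List Int) (left right answer : Int) : Int :=
  if h : left ≤ right then
    let mid := PySem.Int.floordiv (left + right) 2
    let people := aCount n mid times 0
    if people ≥ n then aLoop n times left (mid - 1) mid
    else aLoop n times (mid + 1) right answer
  else answer
termination_by (right + 1 - left).toNat
decreasing_by
  · exact aLoop_dec1 left right h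
  · exact aLoop_dec2 left right h

def solution (n : Int) (times : List Int) : Int :=
  match PySem.List.max? times (fun x => x) with
  | none => 0  -- max([]) raises ValueError in Python; outside Pre_solution
  | some m => aLoop n times 0 (n * m) 0

-- ===== PORT B =====
-- 'f = sum(T // t for t in times)'
def bSum (times : List Int) (T : Int) : Int :=
  times.foldl (fun s t => s + PySem.Int.floordiv T t) 0

-- 'while T <= n * tmin: d = (n-1-m-f)*max(T,1)//(f+m); if d < 1: break; T += d; f = sum(...)'
def bJump (n m tmin : Int) (times : List Int) (T f : Int) : Int × Int :=
  if _h : T ≤ n * tmin then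
    let d := PySem.Int.floordiv ((n - 1 - m - f) * max T 1) (f + m)
    if _hd : d < 1 then (T, f)
    else bJump n m tmin times (T + d) (bSum times (T + d))
  else (T, f)
termination_by (n * tmin + 1 - T).toNat
decreasing_by omega

-- 'i, best = 0, nxt[0]' then 'for j, x in enumerate(nxt): if x < best: i, best = j, x'
-- (nxt[0] on empty nxt raises IndexError in Python; empty times is outside Pre_solution)
def bArgmin (nxt : List Int) : Int × Int :=
  (PySem.List.enumerate nxt 0).foldl (fun st jx => if jx.2 < st.2 then jx else st)
    (0, (PySem.List.pyGet? nxt 0).getD 0)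

-- 'for _ in range(n - f): … ; last = best ; nxt[i] = best + times[i]'
def bLoop (times : List Int) : Nat → List Int → Int → Int
  | 0, _, last => last
  | k+1, nxt, _ =>
    let ib := bArgmin nxt
    bLoop times k (PySem.List.pySetD nxt ib.1 (ib.2 + PySem.List.pyGetD times ib.1 0)) ib.2

def solution_alt (n : Int) (times : List Int) : Int :=
  if n ≤ 0 then 0
  else
    match PySem.List.min? times (fun x => x) with
    | none => 0  -- min([]) raises ValueError in Python; outside Pre_solution
    | some tmin =>
      let Tf := bJump n times.length tmin times 0 0
      bLoop times (n - Tf.2).toNat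
        (times.map (fun t => (PySem.Int.floordiv Tf.1 t + 1) * t)) Tf.1

-- ===== PRECONDITION & SPEC =====
-- Pre_ excludes empty times (A raises ValueError), lists with a non-positive entry when
-- 0 < n (the problem's domain is positive booth times; there A raises ZeroDivisionError or
-- returns a value of a search over a meaningless bound), lists containing 0 when n = 0
-- (A raises ZeroDivisionError), and lists with no positive entry when n < 0 (A raises or
-- returns 0 from a degenerate search).
def Pre_solution (n : Int) (times : List Int) : Prop :=
  times ≠ [] ∧ ((0 < n ∧ ∀ t ∈ times, 1 ≤ t) ∨ (n = 0 ∧ 0 ∉ times) ∨ (n < 0 ∧ ∃ t ∈ times, 1 ≤ t))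
instance (n : Int) (times : List Int) : Decidable (Pre_solution n times) := by
  unfold Pre_solution; infer_instance

def pvWitness_solution : Int × List Int := (6, [7, 10])

def Spec_solution (n : Int) (times : List Int) (out : Int) : Prop := out = solution_alt n times
instance (n : Int) (times : List Int) (out : Int) : Decidable (Spec_solution n times out) := by unfold Spec_solution; infer_instance

-- ===== CLAIM (what is proved, stated in full; the proofs are below) =====
def Claim_equal_solution : Prop := ∀ (n : Int) (times : List Int), Dom_solution n times → Pre_solution n times → Spec_solution n times (solution n times)

-- ===== LEMMAS AND PROOFS =====

-- spec-level sum Σ_t ⌊T/t⌋ (proof-only; both ports are related to it)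
def sumDiv (times : List Int) (T : Int) : Int :=
  (times.map (fun t => PySem.Int.floordiv T t)).sum

theorem sumDiv_nil (T : Int) : sumDiv [] T = 0 := rfl

theorem sumDiv_cons (t : Int) (ts : List Int) (T : Int) :
    sumDiv (t :: ts) T = PySem.Int.floordiv T t + sumDiv ts T := by
  simp [sumDiv]

theorem floordiv_mono {a b t : Int} (ht : 1 ≤ t) (h : a ≤ b) :
    PySem.Int.floordiv a t ≤ PySem.Int.floordiv b t := by
  rw [PySem.Int.floordiv_eq_ediv_of_pos (by omega), PySem.Int.floordiv_eq_ediv_of_pos (by omega)]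
  exact Int.ediv_le_ediv (by omega) h

theorem floordiv_nonneg' {a t : Int} (ht : 1 ≤ t) (ha : 0 ≤ a) :
    0 ≤ PySem.Int.floordiv a t := by
  rw [PySem.Int.floordiv_eq_ediv_of_pos (by omega)]
  exact Int.ediv_nonneg ha (by omega)

theorem sumDiv_mono {times : List Int} (ht : ∀ t ∈ times, 1 ≤ t) {a b : Int} (h : a ≤ b) :
    sumDiv times a ≤ sumDiv times b := by
  induction times with
  | nil => simp [sumDiv_nil]
  | cons x xs ih =>
    rw [sumDiv_cons, sumDiv_cons]
    have hx : 1 ≤ x := ht x (by simp)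
    have := floordiv_mono hx h
    have := ih (fun t htm => ht t (by simp [htm]))
    omega

theorem sumDiv_zero {times : List Int} (ht : ∀ t ∈ times, 1 ≤ t) : sumDiv times 0 = 0 := by
  induction times with
  | nil => rfl
  | cons x xs ih =>
    rw [sumDiv_cons]
    have hx : 1 ≤ x := ht x (by simp)
    rw [PySem.Int.floordiv_eq_ediv_of_pos (by omega : (0:Int) < x)]
    rw [ih (fun t htm => ht t (by simp [htm]))]
    simp

-- a member's exact quotient bounds the sum from below
theorem sumDiv_self_mem {times : List Int} (ht : ∀ t ∈ times, 1 ≤ t) {m n : Int}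
    (hm : m ∈ times) (hn : 0 ≤ n) : n ≤ sumDiv times (n * m) := by
  have hm1 : 1 ≤ m := ht m hm
  have hterm : PySem.Int.floordiv (n * m) m = n := by
    rw [PySem.Int.floordiv_eq_ediv_of_pos (by omega)]
    exact Int.mul_ediv_cancel n (by omega)
  have hmem : PySem.Int.floordiv (n * m) m ∈ times.map (fun t => PySem.Int.floordiv (n * m) t) :=
    List.mem_map_of_mem hm
  have hle : PySem.Int.floordiv (n * m) m ≤ (times.map (fun t => PySem.Int.floordiv (n * m) t)).sum := by
    apply List.single_le_sum _ _ hmem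
    intro x hx
    obtain ⟨t, htm, rfl⟩ := List.mem_map.mp hx
    exact floordiv_nonneg' (ht t htm) (by nlinarith)
  rw [hterm] at hle
  exact hle

-- A's break-early counter reaches n iff the full sum does
theorem aCount_ge_iff {n mid : Int} (hmid : 0 ≤ mid) :
    ∀ (times : List Int), (∀ t ∈ times, 1 ≤ t) → ∀ p : Int,
      (n ≤ aCount n mid times p ↔ n ≤ p + sumDiv times mid) := by
  intro times
  induction times with
  | nil => intro _ p; simp [aCount, sumDiv_nil]
  | cons t rest ih =>
    intro ht p
    have ht1 : 1 ≤ t := ht t (by simp)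
    have htr : ∀ x ∈ rest, 1 ≤ x := fun x hx => ht x (by simp [hx])
    rw [aCount, sumDiv_cons]
    by_cases hbr : p + PySem.Int.floordiv mid t > n
    · simp only [hbr, if_pos]
      have h0 : 0 ≤ sumDiv rest mid := by
        have := sumDiv_mono htr (le_refl mid)
        have hz := sumDiv_zero htr
        have := sumDiv_mono htr hmid
        omega
      constructor
      · intro _; omega
      · intro _; omega
    · simp only [hbr, if_neg, not_false_iff]
      rw [ih htr (p + PySem.Int.floordiv mid t)]
      constructor <;> intro h <;> omega

-- A's binary search returns the least feasible value L
theorem aLoop_eq {n : Int} {times : List Int} {L : Int}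
    (hLf : n ≤ sumDiv times L) (hLmin : ∀ T, T < L → sumDiv times T < n)
    (ht : ∀ t ∈ times, 1 ≤ t) :
    ∀ left right answer : Int, 0 ≤ left → left ≤ L → (L ≤ right ∨ answer = L) →
      aLoop n times left right answer = L := by
  intro left right answer h0 hlL hdis
  rw [aLoop]
  by_cases hlr : left ≤ right
  · simp only [dif_pos hlr]
    have hmid := PySem.Int.floordiv_two_mid_bounds hlr
    set mid := PySem.Int.floordiv (left + right) 2 with hmiddef
    have hmid0 : 0 ≤ mid := by omega
    have hiff := @aCount_ge_iff n mid hmid0 times ht 0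
    by_cases hge : aCount n mid times 0 ≥ n
    · simp only [hge, if_pos]
      have hfeas : n ≤ sumDiv times mid := by have := hiff.mp hge; omega
      have hLmid : L ≤ mid := by
        by_contra hc
        have := hLmin mid (by omega)
        omega
      exact aLoop_eq hLf hLmin ht left (mid - 1) mid h0 hlL (by omega)
    · simp only [hge, if_neg, not_false_iff]
      have hnfeas : ¬ n ≤ sumDiv times mid := by
        intro hc
        exact hge (by rw [ge_iff_le, hiff]; omega)
      have hmidL : mid < L := by
        by_contra hc
        exact hnfeas (le_trans hLf (sumDiv_mono ht (by omega)))
      exact aLoop_eq hLf hLmin ht (mid + 1) right answer (by omega) (by omega) hdis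
  · simp only [dif_neg hlr]
    omega
termination_by left right _ => (right + 1 - left).toNat
decreasing_by
  · omega
  · omega

-- n = 0 makes A's counter return 0 at mid = 0 (every entry nonzero, so 0 // t = 0 throughout)
theorem aCount_zero : ∀ (times : List Int), 0 ∉ times → aCount 0 0 times 0 = 0 := by
  intro times
  induction times with
  | nil => intro _; rfl
  | cons t rest ih =>
    intro ht
    rw [aCount]
    have h0 : PySem.Int.floordiv 0 t = 0 := by simp [PySem.Int.floordiv]
    simp only [h0]
    rw [if_neg (by omega)]
    simpa using ih (fun hx => ht (by simp [hx]))

-- ---- B-side: the greedy simulation pops the n smallest scheduled completion times ----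

-- a list sum as a Finset.range sum over positions
theorem sum_map_eq_range (l : List Int) (f : Int → Int) :
    (l.map f).sum = ∑ j ∈ Finset.range l.length, f (l.getD j 0) := by
  induction l with
  | nil => simp
  | cons x xs ih =>
    rw [List.map_cons, List.sum_cons, ih]
    rw [List.length_cons, Finset.sum_range_succ']
    simp [List.getD]
    omega

-- the positional sum Σ_j ⌊nxt[j] / times[j]⌋
def SInt (a b : List Int) : Int :=
  ∑ j ∈ Finset.range b.length, PySem.Int.floordiv (a.getD j 0) (b.getD j 0)

-- fold invariant of B's argmin scan
theorem bArgmin_aux (l : List Int) : ∀ (s : Int) (st : Int × Int),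
    (((PySem.List.enumerate l s).foldl (fun st jx => if jx.2 < st.2 then jx else st) st = st ∨
      ∃ (k : Nat) (h : k < l.length),
        (PySem.List.enumerate l s).foldl (fun st jx => if jx.2 < st.2 then jx else st) st = (s + k, l[k])) ∧
     ((PySem.List.enumerate l s).foldl (fun st jx => if jx.2 < st.2 then jx else st) st).2 ≤ st.2 ∧
     ∀ x ∈ l, ((PySem.List.enumerate l s).foldl (fun st jx => if jx.2 < st.2 then jx else st) st).2 ≤ x) := by
  induction l with
  | nil => intro s st; simp [PySem.List.enumerate_nil]
  | cons y ys ih =>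
    intro s st
    rw [PySem.List.enumerate_cons, List.foldl_cons]
    by_cases hy : y < st.2
    · have hstep : (if ((s, y) : Int × Int).2 < st.2 then ((s, y) : Int × Int) else st) = (s, y) := by
        simp [hy]
      rw [hstep]
      obtain ⟨hc, hle, hall⟩ := ih (s + 1) (s, y)
      refine ⟨?_, ?_, ?_⟩
      · rcases hc with h | ⟨k, hk, hr⟩
        · right; exact ⟨0, by simp, by simpa using h⟩
        · right; exact ⟨k + 1, by simpa using hk, by rw [hr]; simp; omega⟩
      · exact le_trans hle (le_of_lt hy)
      · intro x hx
        rcases List.mem_cons.mp hx with rfl | hx'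
        · exact hle
        · exact hall x hx'
    · have hstep : (if ((s, y) : Int × Int).2 < st.2 then ((s, y) : Int × Int) else st) = st := by
        simp [hy]
      rw [hstep]
      obtain ⟨hc, hle, hall⟩ := ih (s + 1) st
      refine ⟨?_, hle, ?_⟩
      · rcases hc with h | ⟨k, hk, hr⟩
        · left; exact h
        · right; exact ⟨k + 1, by simpa using hk, by rw [hr]; simp; omega⟩
      · intro x hx
        rcases List.mem_cons.mp hx with rfl | hx'
        · omega
        · exact hall x hx'

-- B's scan returns a position of a minimum of nxt
theorem bArgmin_spec (nxt : List Int) (hne : nxt ≠ []) :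
    ∃ (i : Nat) (h : i < nxt.length),
      bArgmin nxt = ((i : Int), nxt[i]) ∧ ∀ x ∈ nxt, nxt[i] ≤ x := by
  obtain ⟨y, ys, rfl⟩ := List.exists_cons_of_ne_nil hne
  have h0 : ((PySem.List.pyGet? (y :: ys) (0 : Int)).getD 0) = y := by
    simp [PySem.List.pyGet?, PySem.List.pyIdx?]
  obtain ⟨hc, _, hall⟩ := bArgmin_aux (y :: ys) 0 (0, (PySem.List.pyGet? (y :: ys) (0 : Int)).getD 0)
  unfold bArgmin
  rcases hc with h | ⟨k, hk, hr⟩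
  · refine ⟨0, by simp, ?_, ?_⟩
    · rw [h, h0]; simp
    · intro x hx
      have := hall x hx
      rw [h, h0] at this
      simpa using this
  · refine ⟨k, hk, ?_, ?_⟩
    · rw [hr]; simp
    · intro x hx
      have := hall x hx
      rw [hr] at this
      simpa using this

-- positional getD facts used by the invariant
theorem getD_lt (l : List Int) (j : Nat) (h : j < l.length) : l.getD j 0 = l[j] :=
  List.getD_eq_getElem l 0 h

theorem getD_mem (l : List Int) (j : Nat) (h : j < l.length) : l.getD j 0 ∈ l := by
  rw [getD_lt l j h]; exact List.getElem_mem h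

theorem getD_set_self' (l : List Int) (i : Nat) (v : Int) (h : i < l.length) :
    (l.set i v).getD i 0 = v := by
  rw [getD_lt _ i (by simpa using h)]
  exact List.getElem_set_self ..

theorem getD_set_ne' (l : List Int) (i : Nat) (v : Int) (j : Nat) (h : j ≠ i) :
    (l.set i v).getD j 0 = l.getD j 0 := by
  simp [List.getD, List.getElem?_set_ne (by omega : i ≠ j)]

theorem floordiv_exact (a t : Int) (ht : 0 < t) : PySem.Int.floordiv (a * t) t = a := by
  rw [PySem.Int.floordiv_eq_ediv_of_pos ht]
  exact Int.mul_ediv_cancel a (by omega)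

-- SInt after updating one position
theorem SInt_set (nxt times : List Int) (i : Nat) (hi : i < times.length)
    (hi' : i < nxt.length) (v : Int) :
    SInt (nxt.set i v) times = SInt nxt times +
      (PySem.Int.floordiv v (times.getD i 0) - PySem.Int.floordiv (nxt.getD i 0) (times.getD i 0)) := by
  unfold SInt
  have hcong : ∀ j ∈ Finset.range times.length,
      PySem.Int.floordiv ((nxt.set i v).getD j 0) (times.getD j 0)
      = PySem.Int.floordiv (nxt.getD j 0) (times.getD j 0) +
        (if j = i then PySem.Int.floordiv v (times.getD i 0) - PySem.Int.floordiv (nxt.getD i 0) (times.getD i 0) else 0) := by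
    intro j _
    by_cases hji : j = i
    · subst hji
      rw [getD_set_self' nxt j v hi']
      simp only [if_true]
      ring
    · rw [getD_set_ne' nxt i v j hji, if_neg hji]
      ring
  rw [Finset.sum_congr rfl hcong, Finset.sum_add_distrib,
    Finset.sum_ite_eq' (Finset.range times.length) i, if_pos (Finset.mem_range.mpr hi)]

-- floor-division bracket: q*t <= x < (q+1)*t for q = x // t, t >= 1
theorem floordiv_bounds (x t : Int) (ht : 1 ≤ t) :
    PySem.Int.floordiv x t * t ≤ x ∧ x < (PySem.Int.floordiv x t + 1) * t := by
  rw [PySem.Int.floordiv_eq_ediv_of_pos (by omega)]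
  have h1 := Int.mul_ediv_add_emod x t
  have h2 := Int.emod_nonneg x (by omega : t ≠ 0)
  have h3 := Int.emod_lt_of_pos x (by omega : 0 < t)
  constructor
  · nlinarith
  · nlinarith

theorem getD_map (g : Int → Int) (l : List Int) (j : Nat) (h : j < l.length) :
    (l.map g).getD j 0 = g (l.getD j 0) := by
  rw [getD_lt _ j (by simpa using h), getD_lt l j h]
  simp

-- B's generator sum is the spec sum
theorem bSum_eq (times : List Int) (c : Int) : bSum times c = sumDiv times c := by
  suffices h : ∀ (xs : List Int) (a : Int),
      xs.foldl (fun s t => s + PySem.Int.floordiv c t) a = a + sumDiv xs c by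
    have := h times 0; simpa [bSum] using this
  intro xs
  induction xs with
  | nil => intro a; simp [sumDiv_nil]
  | cons x l ih => intro a; rw [List.foldl_cons, ih, sumDiv_cons]; ring

theorem sumDiv_nonneg' {times : List Int} (ht : ∀ t ∈ times, 1 ≤ t) {T : Int} (hT : 0 ≤ T) :
    0 ≤ sumDiv times T := by
  have := sumDiv_mono ht hT
  rw [sumDiv_zero ht] at this
  exact this

-- one secant jump cannot pass the threshold: count stays ≤ n - 1
theorem sumDiv_jump (times : List Int) (ht : ∀ t ∈ times, 1 ≤ t) (n T d : Int)
    (hT : 0 ≤ T) (hd : 1 ≤ d) (hn : 1 ≤ n)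
    (hbound : d * (sumDiv times T + times.length) ≤
      (n - 1 - times.length - sumDiv times T) * max T 1) :
    sumDiv times (T + d) ≤ n - 1 := by
  have hf0 : 0 ≤ sumDiv times T := sumDiv_nonneg' ht hT
  -- pointwise: (T+1) * ⌊(T+d)/t⌋ ≤ (T+d) * (⌊T/t⌋ + 1)
  have hpt : ∀ j ∈ Finset.range times.length,
      (T + 1) * PySem.Int.floordiv (T + d) (times.getD j 0) ≤
      (T + d) * (PySem.Int.floordiv T (times.getD j 0) + 1) := by
    intro j hj
    have htj : 1 ≤ times.getD j 0 := ht _ (getD_mem times j (Finset.mem_range.mp hj))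
    obtain ⟨ha1, _⟩ := floordiv_bounds (T + d) (times.getD j 0) htj
    obtain ⟨_, hb2⟩ := floordiv_bounds T (times.getD j 0) htj
    have ha0 : 0 ≤ PySem.Int.floordiv (T + d) (times.getD j 0) :=
      floordiv_nonneg' htj (by omega)
    have hb0 : 0 ≤ PySem.Int.floordiv T (times.getD j 0) :=
      floordiv_nonneg' htj hT
    nlinarith
  have hsum := Finset.sum_le_sum hpt
  rw [← Finset.mul_sum, ← Finset.mul_sum] at hsum
  have hL : sumDiv times (T + d) =
      ∑ j ∈ Finset.range times.length, PySem.Int.floordiv (T + d) (times.getD j 0) := by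
    unfold sumDiv; rw [sum_map_eq_range]
  have hR : ∑ j ∈ Finset.range times.length, (PySem.Int.floordiv T (times.getD j 0) + 1)
      = sumDiv times T + times.length := by
    rw [Finset.sum_add_distrib, Finset.sum_const, Finset.card_range]
    have : sumDiv times T =
        ∑ j ∈ Finset.range times.length, PySem.Int.floordiv T (times.getD j 0) := by
      unfold sumDiv; rw [sum_map_eq_range]
    rw [← this]; ring
  rw [← hL, hR] at hsum
  -- combine with the jump bound
  by_cases hT0 : T = 0
  · subst hT0
    have hz : sumDiv times 0 = 0 := sumDiv_zero ht
    rw [hz] at hbound hsum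
    simp at hbound hsum
    rw [zero_add]
    nlinarith [Int.natCast_nonneg times.length]
  · have hT1 : 1 ≤ T := by omega
    rw [max_eq_left (by omega : (1:Int) ≤ T)] at hbound
    nlinarith

-- the jump phase keeps T ≥ 0, f = count(T) and count(T) ≤ n - 1
theorem bJump_inv (times : List Int) (ht : ∀ t ∈ times, 1 ≤ t) (n tmin : Int) (hn : 1 ≤ n) :
    ∀ (T f : Int), 0 ≤ T → f = sumDiv times T → sumDiv times T ≤ n - 1 →
      0 ≤ (bJump n times.length tmin times T f).1 ∧
      (bJump n times.length tmin times T f).2 =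
        sumDiv times (bJump n times.length tmin times T f).1 ∧
      sumDiv times (bJump n times.length tmin times T f).1 ≤ n - 1 := by
  intro T f hT hf hle
  rw [bJump]
  by_cases hg : T ≤ n * tmin
  · simp only [dif_pos hg]
    set d := PySem.Int.floordiv ((n - 1 - times.length - f) * max T 1) (f + times.length) with hddef
    by_cases hd : d < 1
    · simp only [dif_pos hd]
      exact ⟨hT, hf, hle⟩
    · simp only [dif_neg hd]
      have hfm : 0 < f + times.length := by
        by_contra hc
        have : f + times.length ≤ 0 := by omega
        have hz : d = 0 ∨ d ≤ 0 := by
          by_cases hzz : f + times.length = 0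
          · left; rw [hddef, hzz]; simp [PySem.Int.floordiv]
          · -- f + len < 0 is impossible: f = sumDiv T ≥ 0 and len ≥ 0
            exfalso
            have := sumDiv_nonneg' ht hT
            have := Int.natCast_nonneg times.length
            omega
        omega
      have hbound : d * (f + times.length) ≤ (n - 1 - times.length - f) * max T 1 := by
        have h1 := (PySem.Int.le_floordiv_iff_mul_le
          (a := (n - 1 - times.length - f) * max T 1) (b := f + times.length) (q := d) hfm).mp
          (le_refl d)
        linarith [h1]
      rw [hf] at hbound
      have hjump := sumDiv_jump times ht n T d hT (by omega) hn hbound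
      exact bJump_inv times ht n tmin hn (T + d) (bSum times (T + d)) (by omega)
        (bSum_eq times (T + d)) hjump
  · simp only [dif_neg hg]
    exact ⟨hT, hf, hle⟩
termination_by T _ => (n * tmin + 1 - T).toNat
decreasing_by omega

-- the key invariant of the simulation phase: starting from a valid schedule state
-- (nxt holds each booth's next completion, p completions ≤ last so far), after k more
-- pops the returned value L satisfies p + k ≤ sumDiv L and sumDiv (L-1) < p + k
theorem bLoop_inv (times : List Int) (hne : times ≠ []) (ht : ∀ t ∈ times, 1 ≤ t) :
    ∀ (k : Nat) (nxt : List Int) (last : Int) (p : Nat),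
      nxt.length = times.length →
      (∀ j, j < times.length → ∃ c : Nat, nxt.getD j 0 = ((c : Int) + 1) * times.getD j 0) →
      SInt nxt times = (p : Int) + times.length →
      (∀ j, j < times.length → nxt.getD j 0 - times.getD j 0 ≤ last ∧ last ≤ nxt.getD j 0) →
      (k = 0 → 1 ≤ last ∧ ∃ j, j < times.length ∧ last = nxt.getD j 0 - times.getD j 0) →
      1 ≤ bLoop times k nxt last ∧
      (p : Int) + (k : Int) ≤ sumDiv times (bLoop times k nxt last) ∧
      sumDiv times (bLoop times k nxt last - 1) < (p : Int) + (k : Int) := by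
  intro k
  induction k with
  | zero =>
    intro nxt last p hlen hQ hS hbd hk0
    obtain ⟨hl1, j0, hj0, hw⟩ := hk0 rfl
    have hb0 : bLoop times 0 nxt last = last := rfl
    rw [hb0]
    have hsum : sumDiv times last =
        ∑ j ∈ Finset.range times.length, PySem.Int.floordiv last (times.getD j 0) := by
      unfold sumDiv; rw [sum_map_eq_range]
    have hsum1 : sumDiv times (last - 1) =
        ∑ j ∈ Finset.range times.length, PySem.Int.floordiv (last - 1) (times.getD j 0) := by
      unfold sumDiv; rw [sum_map_eq_range]
    have hSsub : ∑ j ∈ Finset.range times.length,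
        (PySem.Int.floordiv (nxt.getD j 0) (times.getD j 0) - 1) = (p : Int) := by
      rw [Finset.sum_sub_distrib, Finset.sum_const, Finset.card_range]
      have := hS
      unfold SInt at this
      rw [this]; ring
    -- pointwise facts
    have hfacts : ∀ j ∈ Finset.range times.length,
        PySem.Int.floordiv (nxt.getD j 0) (times.getD j 0) - 1 ≤ PySem.Int.floordiv last (times.getD j 0) ∧
        PySem.Int.floordiv (last - 1) (times.getD j 0) ≤ PySem.Int.floordiv (nxt.getD j 0) (times.getD j 0) - 1 := by
      intro j hj
      have hj' := Finset.mem_range.mp hj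
      obtain ⟨c, hc⟩ := hQ j hj'
      have htj : 1 ≤ times.getD j 0 := ht _ (getD_mem times j hj')
      have hfd : PySem.Int.floordiv (nxt.getD j 0) (times.getD j 0) = (c : Int) + 1 := by
        rw [hc]; exact floordiv_exact _ _ (by omega)
      obtain ⟨hlow, hhigh⟩ := hbd j hj'
      constructor
      · rw [hfd]
        have : (c : Int) * times.getD j 0 ≤ last := by
          have : nxt.getD j 0 - times.getD j 0 = (c : Int) * times.getD j 0 := by rw [hc]; ring
          omega
        have := (PySem.Int.le_floordiv_iff_mul_le (a := last) (b := times.getD j 0) (q := (c : Int)) (by omega)).mpr this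
        omega
      · rw [hfd]
        have hlt : last - 1 < ((c : Int) + 1) * times.getD j 0 := by rw [← hc]; omega
        have := (PySem.Int.floordiv_lt_iff_lt_mul (a := last - 1) (b := times.getD j 0) (q := (c : Int) + 1) (by omega)).mpr hlt
        omega
    refine ⟨hl1, ?_, ?_⟩
    · -- p + 0 ≤ sumDiv last
      have := Finset.sum_le_sum (fun j hj => (hfacts j hj).1)
      rw [hSsub] at this
      rw [hsum]
      push_cast
      omega
    · -- sumDiv (last - 1) < p + 0
      have hstrict : ∃ j ∈ Finset.range times.length,
          PySem.Int.floordiv (last - 1) (times.getD j 0) <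
          PySem.Int.floordiv (nxt.getD j 0) (times.getD j 0) - 1 := by
        refine ⟨j0, Finset.mem_range.mpr hj0, ?_⟩
        obtain ⟨c, hc⟩ := hQ j0 hj0
        have htj : 1 ≤ times.getD j0 0 := ht _ (getD_mem times j0 hj0)
        have hfd : PySem.Int.floordiv (nxt.getD j0 0) (times.getD j0 0) = (c : Int) + 1 := by
          rw [hc]; exact floordiv_exact _ _ (by omega)
        have hlast_eq : last = (c : Int) * times.getD j0 0 := by rw [hw, hc]; ring
        have hlt : last - 1 < (c : Int) * times.getD j0 0 := by omega
        have := (PySem.Int.floordiv_lt_iff_lt_mul (a := last - 1) (b := times.getD j0 0) (q := (c : Int)) (by omega)).mpr hlt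
        omega
      have := Finset.sum_lt_sum (fun j hj => (hfacts j hj).2) hstrict
      rw [hSsub] at this
      rw [hsum1]
      push_cast
      omega
  | succ k ih =>
    intro nxt last p hlen hQ hS hbd hk0
    have hnxtne : nxt ≠ [] := by
      intro h
      apply hne
      have : times.length = 0 := by rw [← hlen, h]; rfl
      exact List.length_eq_zero_iff.mp this
    obtain ⟨i, hi, heq, hmin⟩ := bArgmin_spec nxt hnxtne
    have hit : i < times.length := by omega
    have hti : 1 ≤ times.getD i 0 := ht _ (getD_mem times i hit)
    obtain ⟨ci, hci⟩ := hQ i hit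
    have hbesti : nxt.getD i 0 = nxt[i] := getD_lt nxt i hi
    have hstep : bLoop times (k+1) nxt last
        = bLoop times k (nxt.set i (nxt[i] + times[i])) (nxt[i]) := by
      rw [bLoop, heq]
      have h1 : PySem.List.pySetD nxt ((i : Nat) : Int) (nxt[i] + PySem.List.pyGetD times ((i : Nat) : Int) 0)
          = nxt.set i (nxt[i] + times[i]) := by
        rw [PySem.List.pyGetD_natCast, PySem.List.pySetD_natCast]
        · rw [getD_lt times i hit]
      rw [h1]
    have hbest1 : 1 ≤ nxt[i] := by
      rw [← hbesti, hci]
      nlinarith [Int.natCast_nonneg ci]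
    have hlastle : ∀ j, j < times.length → nxt.getD j 0 - times.getD j 0 ≤ nxt[i] := by
      intro j hj
      have h1 := (hbd j hj).1
      have h2 := (hbd i hit).2
      rw [hbesti] at h2
      omega
    have hminD : ∀ j, j < times.length → nxt[i] ≤ nxt.getD j 0 := by
      intro j hj
      exact hmin _ (getD_mem nxt j (by omega))
    rw [hstep]
    have hres := ih (nxt.set i (nxt[i] + times[i])) (nxt[i]) (p + 1)
      (by simp [List.length_set, hlen])
      (by
        intro j hj
        by_cases hji : j = i
        · subst hji
          refine ⟨ci + 1, ?_⟩
          rw [getD_set_self' nxt j _ hi, ← hbesti, getD_lt times j hit, ← getD_lt times j hit, hci]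
          push_cast
          ring
        · rw [getD_set_ne' nxt i _ j hji]
          exact hQ j hj)
      (by
        rw [SInt_set nxt times i hit hi _]
        have hnew : PySem.Int.floordiv (nxt[i] + times[i]) (times.getD i 0) = (ci : Int) + 2 := by
          have : nxt[i] + times[i] = (((ci : Int) + 2)) * times.getD i 0 := by
            rw [← hbesti, ← getD_lt times i hit, hci]; ring
          rw [this]; exact floordiv_exact _ _ (by omega)
        have hold : PySem.Int.floordiv (nxt.getD i 0) (times.getD i 0) = (ci : Int) + 1 := by
          rw [hci]; exact floordiv_exact _ _ (by omega)
        rw [hnew, hold, hS]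
        push_cast
        ring)
      (by
        intro j hj
        by_cases hji : j = i
        · subst hji
          rw [getD_set_self' nxt j _ hi]
          have : 1 ≤ times[j] := by rw [← getD_lt times j hit]; exact hti
          constructor
          · rw [getD_lt times j hit]; omega
          · omega
        · rw [getD_set_ne' nxt i _ j hji]
          exact ⟨hlastle j hj, hminD j hj⟩)
      (by
        intro _
        refine ⟨hbest1, i, hit, ?_⟩
        rw [getD_set_self' nxt i _ hi, getD_lt times i hit]
        ring)
    refine ⟨hres.1, ?_, ?_⟩
    · have := hres.2.1; push_cast at this ⊢; omega
    · have := hres.2.2; push_cast at this ⊢; omega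

-- ===== VERDICT (by name: the statement is the Claim_ definition above) =====
theorem solution_spec : Claim_equal_solution := by
  intro n times _hdom hpre
  obtain ⟨hne, hcase⟩ := hpre
  unfold Spec_solution solution solution_alt
  cases hmax : PySem.List.max? times (fun x => x) with
  | none => exact absurd ((PySem.List.max?_eq_none_iff times (fun x => x)).mp hmax) hne
  | some m =>
  dsimp only
  have hm_mem : m ∈ times := PySem.List.max?_mem hmax
  rcases hcase with ⟨hn, ht⟩ | ⟨hz, h0⟩ | ⟨hn, t0, ht0m, ht01⟩
  · -- 0 < n with positive booth times: the simulation's last popped completion time is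
    -- the least feasible threshold, which is what A's binary search returns
    rw [if_neg (by omega)]
    have hm1 : 1 ≤ m := ht m hm_mem
    cases hminq : PySem.List.min? times (fun x => x) with
    | none => exact absurd ((PySem.List.min?_eq_none_iff times (fun x => x)).mp hminq) hne
    | some tmin =>
    dsimp only
    -- phase 1 exit state
    have hjump := bJump_inv times ht n tmin (by omega) 0 0 le_rfl
      (by rw [sumDiv_zero ht]) (by rw [sumDiv_zero ht]; omega)
    set T := (bJump n times.length tmin times 0 0).1 with hTdef
    set f := (bJump n times.length tmin times 0 0).2 with hfdef
    obtain ⟨hT0, hfeq, hfle⟩ := hjump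
    -- phase 2 entry state
    set nxt0 := times.map (fun t => (PySem.Int.floordiv T t + 1) * t) with hnxt0
    have hlen0 : nxt0.length = times.length := by simp [hnxt0]
    have hget0 : ∀ j, j < times.length →
        nxt0.getD j 0 = (PySem.Int.floordiv T (times.getD j 0) + 1) * times.getD j 0 := by
      intro j hj
      exact getD_map _ times j hj
    have hf0 : 0 ≤ f := by rw [hfeq]; exact sumDiv_nonneg' ht hT0
    have hfle' : f ≤ n - 1 := by rw [hfeq]; exact hfle
    have hsim := bLoop_inv times hne ht (n - f).toNat nxt0 T f.toNat
      hlen0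
      (by
        intro j hj
        have htj : 1 ≤ times.getD j 0 := ht _ (getD_mem times j hj)
        have hq0 : 0 ≤ PySem.Int.floordiv T (times.getD j 0) := floordiv_nonneg' htj hT0
        refine ⟨(PySem.Int.floordiv T (times.getD j 0)).toNat, ?_⟩
        rw [hget0 j hj, Int.toNat_of_nonneg hq0])
      (by
        unfold SInt
        have hcong : ∀ j ∈ Finset.range times.length,
            PySem.Int.floordiv (nxt0.getD j 0) (times.getD j 0)
            = PySem.Int.floordiv T (times.getD j 0) + 1 := by
          intro j hj
          have hj' := Finset.mem_range.mp hj
          have htj : 1 ≤ times.getD j 0 := ht _ (getD_mem times j hj')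
          rw [hget0 j hj']
          exact floordiv_exact _ _ (by omega)
        rw [Finset.sum_congr rfl hcong, Finset.sum_add_distrib, Finset.sum_const, Finset.card_range]
        have hs : ∑ j ∈ Finset.range times.length, PySem.Int.floordiv T (times.getD j 0)
            = sumDiv times T := by
          unfold sumDiv; rw [sum_map_eq_range]
        rw [hs, ← hfeq, Int.toNat_of_nonneg hf0]
        ring
      )
      (by
        intro j hj
        have htj : 1 ≤ times.getD j 0 := ht _ (getD_mem times j hj)
        obtain ⟨hlo, hhi⟩ := floordiv_bounds T (times.getD j 0) htj
        rw [hget0 j hj]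
        constructor
        · nlinarith
        · omega)
      (by
        intro hk
        exfalso
        omega)
    obtain ⟨hL1, hLf', hLs'⟩ := hsim
    set L := bLoop times (n - f).toNat nxt0 T with hLdef
    have hcast : ((f.toNat : Nat) : Int) + (((n - f).toNat : Nat) : Int) = n := by
      omega
    rw [hcast] at hLf' hLs'
    have hLmin : ∀ Tq, Tq < L → sumDiv times Tq < n := by
      intro Tq hT
      have := sumDiv_mono ht (show Tq ≤ L - 1 by omega)
      omega
    have hfm : n ≤ sumDiv times (n * m) := sumDiv_self_mem ht hm_mem (by omega)
    have hLm : L ≤ n * m := by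
      by_contra hc
      have := hLmin (n * m) (by omega)
      omega
    exact aLoop_eq hLf' hLmin ht 0 (n * m) 0 le_rfl (by omega) (Or.inl hLm)
  · -- n = 0, no zero entry: A's single iteration at mid = 0 counts 0 people and answers 0
    subst hz
    rw [if_pos le_rfl]
    rw [zero_mul, aLoop]
    simp only [dif_pos (le_refl (0:Int))]
    have hmid : PySem.Int.floordiv (0 + 0) 2 = 0 := by
      rw [PySem.Int.floordiv_eq_ediv_of_pos (by omega)]; decide
    simp only [hmid, aCount_zero times h0]
    rw [if_pos (by omega : (0:Int) ≥ 0), aLoop]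
    rw [dif_neg (by omega : ¬((0:Int) ≤ 0 - 1))]
  · -- n < 0 with a positive entry: n * max < 0, so A's loop never runs and answers 0
    have hm1 : 1 ≤ m := le_trans ht01 (PySem.List.max?_isMax hmax t0 ht0m)
    rw [if_pos (by omega)]
    have hneg : n * m < 0 := by
      nlinarith [mul_pos (show (0:Int) < -n by omega) (show (0:Int) < m by omega)]
    rw [aLoop, dif_neg (by omega : ¬((0:Int) ≤ n * m))]
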